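-- pv_equiv track=rewrite | github.com/coderved63/coderved63-Stock_Mitra-Stock-Management-App-Python- | services/stock_search.py | _get_product_for_action
-- ===== SOURCE A (Python) =====
-- def _get_product_for_action(query, all_stock_data):
--     """Find a product by query string in stock data."""
--     query_lower = query.lower().strip()
--     potential_products = {}
--
--     for carton in all_stock_data:
--         if carton['product_id'].lower() == query_lower:
--             potential_products[carton['product_id']] = carton['product_name']
--             break
--
--     if not potential_products:
--         for carton in all_stock_data:
--             if query_lower in carton['product_name'].lower() or \
--                carton['product_name'].lower() in query_lower:
--                 potential_products[carton['product_id']] = carton['product_name']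
--
--     if not potential_products:
--         return None, None, f"Sorry, I couldn't find any stock matching '{query}'. Please try a different name or ID."
--     elif len(potential_products) > 1:
--         matched_names = [f"{pid} ({pname})" for pid, pname in potential_products.items()]
--         return None, None, f"I found multiple products matching '{query}': {', '.join(matched_names)}. Please be more specific or provide the exact Product ID."
--     else:
--         product_id = list(potential_products.keys())[0]
--         product_name = potential_products[product_id]
--         return product_id, product_name, ''
-- ===== SOURCE B (Python) =====
-- def _get_product_for_action(query, all_stock_data):
--     """Find a product by query string in stock data (single pass: exact-id hit + fuzzy-name dict)."""
--     query_lower = query.lower().strip()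
--     exact = None
--     fuzzy = {}
--     for carton in all_stock_data:
--         pid = carton['product_id']
--         pname = carton['product_name']
--         if exact is None and pid.lower() == query_lower:
--             exact = (pid, pname)
--         name_lower = pname.lower()
--         if query_lower in name_lower or name_lower in query_lower:
--             fuzzy[pid] = pname
--     items = [exact] if exact is not None else list(fuzzy.items())
--     if len(items) == 0:
--         return None, None, f"Sorry, I couldn't find any stock matching '{query}'. Please try a different name or ID."
--     if len(items) == 1:
--         pid, pname = items[0]
--         return pid, pname, ''
--     listing = ', '.join(f"{pid} ({pname})" for pid, pname in items)
--     return None, None, f"I found multiple products matching '{query}': {listing}. Please be more specific or provide the exact Product ID."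
-- ===== Notes on version B (the rewrite author's own statement) =====
-- stated objective: alternative
-- what changed: Replaces A's two sequential scans (break-on-first exact-id loop, then a separate fuzzy-name loop run only when the first found nothing) by a single pass that maintains two accumulators at once - a first-exact-match option and a fuzzy dict - choosing between them after the loop. Pre_ excludes stock lists containing a carton that lacks the 'product_id' or 'product_name' key: Python raises KeyError there (A can still return when an exact-id break occurs before the malformed carton, but B reads every carton's keys and raises).
import Mathlib
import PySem

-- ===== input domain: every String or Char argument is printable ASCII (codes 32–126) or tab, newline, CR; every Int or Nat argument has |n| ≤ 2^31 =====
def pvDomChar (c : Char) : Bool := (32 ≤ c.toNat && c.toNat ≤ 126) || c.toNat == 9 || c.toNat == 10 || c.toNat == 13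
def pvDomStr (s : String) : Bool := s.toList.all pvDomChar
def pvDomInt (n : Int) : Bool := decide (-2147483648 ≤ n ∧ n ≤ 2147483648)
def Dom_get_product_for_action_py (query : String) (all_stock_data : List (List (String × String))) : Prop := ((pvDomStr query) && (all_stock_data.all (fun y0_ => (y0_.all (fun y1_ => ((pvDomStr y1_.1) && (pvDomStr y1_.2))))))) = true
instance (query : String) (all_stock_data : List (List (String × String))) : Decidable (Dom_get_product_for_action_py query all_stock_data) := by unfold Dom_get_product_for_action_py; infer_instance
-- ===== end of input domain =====

-- B is a single pass with two simultaneous accumulators instead of A's two sequential scans; return values only (no mutation).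

-- ===== PORT A =====
-- carton[k] for a carton dict; Pre_ guarantees the key is present (Python raises KeyError otherwise)
def pvGet (c : List (String × String)) (k : String) : String :=
  ((PySem.Dict.mk c).get? k).getD ""

-- fuzzy test of A's second loop (also the per-carton test of B's fuzzy accumulator)
def pvFuzzy (ql : String) (c : List (String × String)) : Bool :=
  PySem.Str.isIn ql (PySem.Str.lower (pvGet c "product_name")) ||
  PySem.Str.isIn (PySem.Str.lower (pvGet c "product_name")) ql

-- A's first loop: scan for the first exact (case-insensitive) id match, break on hit
def pvALoop1 (ql : String) : List (List (String × String)) → PySem.Dict String String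
  | [] => PySem.Dict.empty
  | c :: rest =>
    if PySem.Str.lower (pvGet c "product_id") = ql then
      PySem.Dict.empty.insert (pvGet c "product_id") (pvGet c "product_name")
    else pvALoop1 ql rest

def get_product_for_action_py (query : String) (all_stock_data : List (List (String × String))) : Option String × Option String × String :=
  let query_lower := PySem.Str.strip (PySem.Str.lower query)
  let p1 := pvALoop1 query_lower all_stock_data
  let potential :=
    if p1.size = 0 then
      all_stock_data.foldl
        (fun d c => if pvFuzzy query_lower c then d.insert (pvGet c "product_id") (pvGet c "product_name") else d) p1
    else p1
  if potential.size = 0 then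
    (none, none, "Sorry, I couldn't find any stock matching '" ++ query ++ "'. Please try a different name or ID.")
  else if potential.size > 1 then
    (none, none, "I found multiple products matching '" ++ query ++ "': " ++
      PySem.Str.join ", " (potential.items.map (fun p => p.1 ++ " (" ++ p.2 ++ ")")) ++
      ". Please be more specific or provide the exact Product ID.")
  else
    let product_id := (potential.keys.headD "")
    let product_name := potential.getD product_id ""
    (some product_id, some product_name, "")

-- ===== PORT B =====
def get_product_for_action_py_alt (query : String) (all_stock_data : List (List (String × String))) : Option String × Option String × String :=
  let query_lower := PySem.Str.strip (PySem.Str.lower query)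
  let st := all_stock_data.foldl
    (fun (s : Option (String × String) × PySem.Dict String String) c =>
      ((if s.1.isNone && (PySem.Str.lower (pvGet c "product_id") == query_lower)
          then some (pvGet c "product_id", pvGet c "product_name") else s.1),
       (if pvFuzzy query_lower c
          then s.2.insert (pvGet c "product_id") (pvGet c "product_name") else s.2)))
    (none, PySem.Dict.empty)
  let items := match st.1 with
    | some e => [e]
    | none => st.2.items
  if items.length = 0 then
    (none, none, "Sorry, I couldn't find any stock matching '" ++ query ++ "'. Please try a different name or ID.")
  else if items.length = 1 then
    (some (items.headD ("", "")).1, some (items.headD ("", "")).2, "")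
  else
    (none, none, "I found multiple products matching '" ++ query ++ "': " ++
      PySem.Str.join ", " (items.map (fun p => p.1 ++ " (" ++ p.2 ++ ")")) ++
      ". Please be more specific or provide the exact Product ID.")

-- ===== PRECONDITION & SPEC =====
-- Pre_ excludes stock lists with a carton lacking the 'product_id' or 'product_name' key: Python raises
-- KeyError there (A may still return when its exact-id break happens before the malformed carton; B reads
-- every carton's keys and raises).
def Pre_get_product_for_action_py (query : String) (all_stock_data : List (List (String × String))) : Prop :=
  (all_stock_data.all (fun c => c.any (fun p => p.1 == "product_id") && c.any (fun p => p.1 == "product_name"))) = true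
instance (query : String) (all_stock_data : List (List (String × String))) : Decidable (Pre_get_product_for_action_py query all_stock_data) := by unfold Pre_get_product_for_action_py; infer_instance

def pvWitness_get_product_for_action_py : String × (List (List (String × String))) :=
  ("a1", [[("product_id", "A1"), ("product_name", "Apple")]])

def Spec_get_product_for_action_py (query : String) (all_stock_data : List (List (String × String))) (out : Option String × Option String × String) : Prop := out = get_product_for_action_py_alt query all_stock_data
instance (query : String) (all_stock_data : List (List (String × String))) (out : Option String × Option String × String) : Decidable (Spec_get_product_for_action_py query all_stock_data out) := by unfold Spec_get_product_for_action_py; infer_instance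

-- ===== CLAIM (what is proved, stated in full; the proofs are below) =====
def Claim_equal_get_product_for_action_py : Prop := ∀ (query : String) (all_stock_data : List (List (String × String))), Dom_get_product_for_action_py query all_stock_data → Pre_get_product_for_action_py query all_stock_data → Spec_get_product_for_action_py query all_stock_data (get_product_for_action_py query all_stock_data)

-- ===== LEMMAS AND PROOFS =====

-- once B's exact-match accumulator is set, the rest of the fold keeps it
theorem pvKeep (ql : String) (e : String × String) (data : List (List (String × String))) :
    data.foldl (fun ex c => if ex.isNone && (PySem.Str.lower (pvGet c "product_id") == ql)
      then some (pvGet c "product_id", pvGet c "product_name") else ex) (some e) = some e := by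
  induction data with
  | nil => rfl
  | cons c rest ih => simpa using ih

-- A's break-on-first loop, characterised by B's exact-match fold
theorem pvALoop1_char (ql : String) (data : List (List (String × String))) :
    pvALoop1 ql data =
      match data.foldl (fun ex c => if ex.isNone && (PySem.Str.lower (pvGet c "product_id") == ql)
          then some (pvGet c "product_id", pvGet c "product_name") else ex) none with
      | none => PySem.Dict.empty
      | some e => PySem.Dict.empty.insert e.1 e.2 := by
  induction data with
  | nil => rfl
  | cons c rest ih =>
    by_cases h : PySem.Str.lower (pvGet c "product_id") = ql
    · simp only [List.foldl_cons]
      have h1 : (if (none : Option (String × String)).isNone && (PySem.Str.lower (pvGet c "product_id") == ql)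
          then some (pvGet c "product_id", pvGet c "product_name") else (none : Option (String × String)))
          = some (pvGet c "product_id", pvGet c "product_name") := by simp [h]
      rw [h1, pvKeep]
      simp [pvALoop1, h]
    · simp only [List.foldl_cons]
      have h1 : (if (none : Option (String × String)).isNone && (PySem.Str.lower (pvGet c "product_id") == ql)
          then some (pvGet c "product_id", pvGet c "product_name") else (none : Option (String × String)))
          = none := by simp [h]
      rw [h1]
      have h2 : pvALoop1 ql (c :: rest) = pvALoop1 ql rest := by simp [pvALoop1, h]
      rw [h2, ih]

-- the fuzzy dict's keys stay unique through the conditional-insert fold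
theorem pvFuzzyNodup (ql : String) (data : List (List (String × String))) :
    ∀ d : PySem.Dict String String, d.keys.Nodup →
    (data.foldl (fun d c => if pvFuzzy ql c
        then d.insert (pvGet c "product_id") (pvGet c "product_name") else d) d).keys.Nodup := by
  induction data with
  | nil => intro d hd; exact hd
  | cons c rest ih =>
    intro d hd
    simp only [List.foldl_cons]
    by_cases hf : pvFuzzy ql c
    · simp only [hf, if_true]
      exact ih _ (PySem.Dict.nodup_keys_insert _ _ _ hd)
    · simp only [hf, if_false, Bool.false_eq_true]
      exact ih _ hd

-- ===== VERDICT (by name: the statement is the Claim_ definition above) =====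
set_option maxHeartbeats 1000000 in
theorem get_product_for_action_py_spec : Claim_equal_get_product_for_action_py := by
  intro query data _ _
  unfold Spec_get_product_for_action_py
  simp only [get_product_for_action_py, get_product_for_action_py_alt]
  have hsplit := PySem.List.foldl_prod_mk
    (f := fun (ex : Option (String × String)) c => if ex.isNone && (PySem.Str.lower (pvGet c "product_id") == PySem.Str.strip (PySem.Str.lower query)) then some (pvGet c "product_id", pvGet c "product_name") else ex)
    (g := fun (d : PySem.Dict String String) c => if pvFuzzy (PySem.Str.strip (PySem.Str.lower query)) c then d.insert (pvGet c "product_id") (pvGet c "product_name") else d)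
    data none PySem.Dict.empty
  simp only [hsplit, pvALoop1_char]
  cases hE : data.foldl (fun ex c => if ex.isNone && (PySem.Str.lower (pvGet c "product_id") == PySem.Str.strip (PySem.Str.lower query))
      then some (pvGet c "product_id", pvGet c "product_name") else ex) none with
  | some e =>
    have hit : ((PySem.Dict.empty.insert e.1 e.2 : PySem.Dict String String)).items = [(e.1, e.2)] := rfl
    simp only [PySem.Dict.size, PySem.Dict.keys, hit, List.length_cons, List.length_nil,
      List.map_cons, List.map_nil, List.headD_cons]
    simp [hit, PySem.Dict.getD_insert_self]
  | none =>
    have hnd := pvFuzzyNodup (PySem.Str.strip (PySem.Str.lower query)) data PySem.Dict.empty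
      (by simp [PySem.Dict.keys_empty])
    set P := data.foldl (fun d c => if pvFuzzy (PySem.Str.strip (PySem.Str.lower query)) c
        then d.insert (pvGet c "product_id") (pvGet c "product_name") else d)
      (PySem.Dict.empty : PySem.Dict String String) with hP
    have hemp : (PySem.Dict.empty : PySem.Dict String String).items = [] := rfl
    rcases hI : P.items with _ | ⟨⟨k, v⟩, rest⟩
    · simp [PySem.Dict.size, hemp, hI]
    · rcases rest with _ | ⟨e2, rest2⟩
      · have hg : P.getD k "" = v :=
          PySem.Dict.getD_of_mem_items P (by rw [hI]; exact List.mem_singleton_self _) hnd ""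
        simp [PySem.Dict.size, PySem.Dict.keys, hemp, hI, hg]
      · simp [PySem.Dict.size, hemp, hI]
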